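-- pv_equiv track=rewrite | github.com/MartineSchut/Thesis | ch. 3 (3-qubit QGEM setup)/QGEM_model_EW_deco_nqubits.py | tpb_group
-- ===== SOURCE A (Python) =====
-- def p_matrix_commute(p_mat_1, p_mat_2):
--     if p_mat_1 == 'I':
--         return 0
--     elif p_mat_2 == 'I':
--         return 0
--     elif p_mat_1 == p_mat_2:
--         return 0
--     else:
--         return 1
--
-- def tpb_group(paulis):
--     paulis_list = paulis[1:]
--     color_dict = {'1': [paulis_list[0]]}
--     color_id = 1
--     for pauli in paulis_list[1:]:
--        to_allocate = True
--        for color in range(1, color_id + 1):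
--            count = 0
--            for group_elem in color_dict[str(color)]:
--                for id_pauli in range(len(paulis_list[0])):
--                    count += p_matrix_commute(pauli[id_pauli], group_elem[id_pauli])
--            if count == 0:
--                color_dict[str(color)].append(pauli)
--                to_allocate = False
--                break
--        if to_allocate:
--            color_dict[str(color_id + 1)] = [pauli]
--            color_id += 1
--     return color_dict
-- ===== SOURCE B (Python) =====
-- def tpb_group(paulis):
--     # One pass per Pauli against a per-group merged non-I profile (not against
--     # every group member); groups are numbered once at the end.
--     rest = paulis[1:]
--     L = len(rest[0])
--     groups = []  # each entry: [profile (first L chars, non-I where any member is non-I), members]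
--     for p in rest:
--         placed = False
--         for g in groups:
--             if all(pc == 'I' or fc == 'I' or pc == fc for pc, fc in zip(p[:L], g[0])):
--                 g[0] = ''.join(pc if fc == 'I' else fc for pc, fc in zip(p[:L], g[0]))
--                 g[1].append(p)
--                 placed = True
--                 break
--         if not placed:
--             groups.append([p[:L], [p]])
--     return {str(i + 1): g[1] for i, g in enumerate(groups)}
-- ===== Notes on version B (the rewrite author's own statement) =====
-- stated objective: faster
-- what changed: Instead of re-scanning every member of every group for each new Pauli (and looking groups up in a dict by stringified color), B keeps one merged non-I profile string per group, tests/merges each Pauli against the profile only, and numbers the groups once at the end.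
import Mathlib
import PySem

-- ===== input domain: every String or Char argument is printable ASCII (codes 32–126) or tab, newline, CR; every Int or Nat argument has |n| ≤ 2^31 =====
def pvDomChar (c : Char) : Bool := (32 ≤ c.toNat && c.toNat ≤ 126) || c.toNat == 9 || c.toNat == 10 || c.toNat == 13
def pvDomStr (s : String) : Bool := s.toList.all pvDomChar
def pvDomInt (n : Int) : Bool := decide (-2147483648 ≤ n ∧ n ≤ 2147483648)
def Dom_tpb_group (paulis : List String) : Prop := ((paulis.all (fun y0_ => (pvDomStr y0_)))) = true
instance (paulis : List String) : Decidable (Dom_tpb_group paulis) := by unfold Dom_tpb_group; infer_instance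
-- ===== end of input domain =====

-- B keeps one merged non-I profile per group and tests each Pauli against that profile only,
-- numbering the groups once at the end, instead of A's rescan of every member of every group
-- through a dict keyed by stringified color numbers.

-- ===== PORT A =====
def p_matrix_commute (p_mat_1 p_mat_2 : Char) : Int :=
  if p_mat_1 = 'I' then 0
  else if p_mat_2 = 'I' then 0
  else if p_mat_1 = p_mat_2 then 0
  else 1

-- pauli[id_pauli]: in-range on Pre_ (every grouped string has length ≥ len(paulis_list[0]))
def pvA_char (s : String) (i : Int) : Char := (PySem.Str.pyGet? s i).getD ' '

-- the inner 'for id_pauli in range(len(paulis_list[0])): count += …' loop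
def pvA_count (first pauli group_elem : String) (c : Int) : Int :=
  (PySem.List.pyRange 0 (PySem.Str.len first) 1).foldl
    (fun acc i => acc + p_matrix_commute (pvA_char pauli i) (pvA_char group_elem i)) c

-- the 'for group_elem in color_dict[str(color)]' loop accumulating count
def pvA_groupCount (first pauli : String) (grp : List String) : Int :=
  grp.foldl (fun acc ge => pvA_count first pauli ge acc) 0

-- the 'for color in range(1, color_id + 1)' loop with its break
def pvA_tryColors (first pauli : String) (d : PySem.Dict String (List String)) :
    List Int → Option (PySem.Dict String (List String))
  | [] => none
  | c :: rest =>
      if pvA_groupCount first pauli (d.getD (PySem.Int.toStr c) []) = 0 then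
        some (d.modify (PySem.Int.toStr c) [] (fun g => g ++ [pauli]))
      else pvA_tryColors first pauli d rest

-- one iteration of the outer 'for pauli in paulis_list[1:]' loop
def pvA_step (first : String) (st : PySem.Dict String (List String) × Int) (pauli : String) :
    PySem.Dict String (List String) × Int :=
  match pvA_tryColors first pauli st.1 (PySem.List.pyRange 1 (st.2 + 1) 1) with
  | some d => (d, st.2)
  | none => (st.1.insert (PySem.Int.toStr (st.2 + 1)) [pauli], st.2 + 1)

def tpb_group (paulis : List String) : List (String × List String) :=
  let paulis_list := PySem.List.slice paulis (some 1) none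
  let first := PySem.List.pyGetD paulis_list 0 ""
  let init : PySem.Dict String (List String) := ⟨[("1", [first])]⟩
  ((PySem.List.slice paulis_list (some 1) none).foldl (pvA_step first) (init, 1)).1.items

-- ===== PORT B =====
-- all(pc == 'I' or fc == 'I' or pc == fc for pc, fc in zip(p[:L], g[0]))
def pvB_compat (pl prof : List Char) : Bool :=
  (pl.zip prof).all (fun q => q.1 == 'I' || q.2 == 'I' || q.1 == q.2)

-- ''.join(pc if fc == 'I' else fc for pc, fc in zip(p[:L], g[0]))
def pvB_merge (pl prof : List Char) : List Char :=
  (pl.zip prof).map (fun q => if q.2 = 'I' then q.1 else q.2)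

-- the 'for g in groups: … break / else: append' body (first-fit placement)
def pvB_place (L : Int) (p : String) : List (List Char × List String) → List (List Char × List String)
  | [] => [(PySem.List.slice p.toList none (some L), [p])]
  | g :: gs =>
      if pvB_compat (PySem.List.slice p.toList none (some L)) g.1 then
        (pvB_merge (PySem.List.slice p.toList none (some L)) g.1, g.2 ++ [p]) :: gs
      else g :: pvB_place L p gs

-- {str(i + 1): g[1] for i, g in enumerate(groups)}
def pvRender (gs : List (List Char × List String)) : List (String × List String) :=
  (PySem.List.enumerate gs 0).map (fun ig => (PySem.Int.toStr (ig.1 + 1), ig.2.2))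

def tpb_group_alt (paulis : List String) : List (String × List String) :=
  let rest := PySem.List.slice paulis (some 1) none
  let L := PySem.Str.len (PySem.List.pyGetD rest 0 "")
  pvRender (rest.foldl (fun gs p => pvB_place L p gs) [])

-- ===== PRECONDITION & SPEC =====
-- Pre_ is exactly where the Python A returns: at least two paulis (A indexes paulis[1:][0]),
-- and every grouped string at least as long as paulis[1] (A indexes each of them at
-- 0 … len(paulis[1])-1, raising IndexError on shorter ones).
def Pre_tpb_group (paulis : List String) : Prop :=
  2 ≤ paulis.length ∧
    ∀ s ∈ paulis.drop 1, ((paulis.drop 1).headI).toList.length ≤ s.toList.length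
instance (paulis : List String) : Decidable (Pre_tpb_group paulis) := by
  unfold Pre_tpb_group; infer_instance

def pvWitness_tpb_group : List String := ["XX", "XY", "IY"]

def Spec_tpb_group (paulis : List String) (out : List (String × List String)) : Prop := out = tpb_group_alt paulis
instance (paulis : List String) (out : List (String × List String)) : Decidable (Spec_tpb_group paulis out) := by unfold Spec_tpb_group; infer_instance

-- ===== CLAIM (what is proved, stated in full; the proofs are below) =====
def Claim_equal_tpb_group : Prop := ∀ (paulis : List String), Dom_tpb_group paulis → Pre_tpb_group paulis → Spec_tpb_group paulis (tpb_group paulis)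

-- ===== LEMMAS AND PROOFS =====

/- Part 1: str(n) is injective on nonnegative ints. -/

def pvVal (a : Nat) (l : List Char) : Nat := l.foldl (fun a c => 10 * a + (c.toNat - 48)) a

theorem pvVal_cons (a : Nat) (c : Char) (l : List Char) :
    pvVal a (c :: l) = pvVal (10 * a + (c.toNat - 48)) l := by
  unfold pvVal
  rw [List.foldl_cons]

theorem pv_digitChar (m : Nat) (h : m < 10) : (Nat.digitChar m).toNat - 48 = m := by
  interval_cases m <;> decide

theorem pv_core_val : ∀ (f n : Nat), n < 10 ^ f → ∀ (l : List Char) (a : Nat),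
    ∃ k, pvVal a (Nat.toDigitsCore 10 f n l) = pvVal (a * 10 ^ k + n) l := by
  intro f
  induction f with
  | zero =>
      intro n hn l a
      have hn0 : n = 0 := by simpa using hn
      subst hn0
      exact ⟨0, by simp [Nat.toDigitsCore]⟩
  | succ f ih =>
      intro n hn l a
      by_cases h : n / 10 = 0
      · refine ⟨1, ?_⟩
        have hm : n % 10 = n := by omega
        simp only [Nat.toDigitsCore, h, if_pos]
        rw [pvVal_cons, pv_digitChar _ (by omega), hm]
        congr 1
        ring
      · have hlt : n / 10 < 10 ^ f := by
          rw [pow_succ] at hn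
          omega
        obtain ⟨k, hk⟩ := ih (n / 10) hlt (Nat.digitChar (n % 10) :: l) a
        refine ⟨k + 1, ?_⟩
        simp only [Nat.toDigitsCore, h, if_false]
        rw [hk, pvVal_cons, pv_digitChar _ (by omega)]
        congr 1
        have h2 : n = 10 * (n / 10) + n % 10 := by omega
        conv_rhs => rw [h2]
        ring

theorem pv_toDigits_inj (m n : Nat) (h : Nat.toDigits 10 m = Nat.toDigits 10 n) : m = n := by
  have hm : m < 10 ^ (m + 1) := by
    calc m < 10 ^ m := Nat.lt_pow_self (by norm_num)
    _ ≤ 10 ^ (m + 1) := Nat.pow_le_pow_right (by norm_num) (Nat.le_succ m)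
  have hn : n < 10 ^ (n + 1) := by
    calc n < 10 ^ n := Nat.lt_pow_self (by norm_num)
    _ ≤ 10 ^ (n + 1) := Nat.pow_le_pow_right (by norm_num) (Nat.le_succ n)
  obtain ⟨k1, h1⟩ := pv_core_val (m + 1) m hm [] 0
  obtain ⟨k2, h2⟩ := pv_core_val (n + 1) n hn [] 0
  unfold Nat.toDigits at h
  rw [h] at h1
  rw [h1] at h2
  simpa [pvVal] using h2

theorem pv_toStr_inj {a b : Int} (ha : 0 ≤ a) (hb : 0 ≤ b)
    (h : PySem.Int.toStr a = PySem.Int.toStr b) : a = b := by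
  have h' := congrArg String.toList h
  rw [PySem.Int.toList_toStr, PySem.Int.toList_toStr] at h'
  unfold PySem.Int.toChars at h'
  rw [if_neg (by omega), if_neg (by omega)] at h'
  have := pv_toDigits_inj _ _ h'
  omega

theorem pv_toStr_beq_false {a b : Int} (ha : 0 ≤ a) (hb : 0 ≤ b) (h : a ≠ b) :
    (PySem.Int.toStr a == PySem.Int.toStr b) = false := by
  rw [beq_eq_false_iff_ne]
  intro hc
  exact h (pv_toStr_inj ha hb hc)

/- Part 2: zero sums of nonnegative ints. -/

theorem pv_commute_nonneg (a b : Char) : 0 ≤ p_matrix_commute a b := by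
  unfold p_matrix_commute; split_ifs <;> norm_num

theorem pv_sum_zero (l : List Int) (h : ∀ x ∈ l, 0 ≤ x) :
    l.sum = 0 ↔ ∀ x ∈ l, x = 0 := by
  induction l with
  | nil => simp
  | cons x xs ih =>
      have hx : 0 ≤ x := h x List.mem_cons_self
      have hxs : ∀ y ∈ xs, 0 ≤ y := fun y hy => h y (List.mem_cons_of_mem _ hy)
      have hs : 0 ≤ xs.sum := List.sum_nonneg hxs
      rw [List.sum_cons]
      constructor
      · intro h0
        have hx0 : x = 0 := by omega
        have hxs0 : xs.sum = 0 := by omega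
        intro y hy
        rcases List.mem_cons.mp hy with rfl | hy'
        · exact hx0
        · exact (ih hxs).mp hxs0 y hy'
      · intro hall
        rw [hall x List.mem_cons_self,
          (ih hxs).mpr fun y hy => hall y (List.mem_cons_of_mem _ hy)]
        simp

/- Part 3: characterisation of A's count and B's compat test. -/

def pvCh (s : String) (i : Nat) : Char := s.toList.getD i ' '

def pvOK (L : Nat) (p m : String) : Prop :=
  ∀ i < L, p_matrix_commute (pvCh p i) (pvCh m i) = 0

theorem pvA_char_nat (s : String) (i : Nat) : pvA_char s (i : Int) = pvCh s i := by
  unfold pvA_char pvCh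
  rw [PySem.Str.pyGet?_natCast]
  simp [List.getD_eq_getElem?_getD]

theorem pvA_count_eq (first p m : String) (c : Int) :
    pvA_count first p m c =
      c + ((List.range first.toList.length).map
        (fun i => p_matrix_commute (pvCh p i) (pvCh m i))).sum := by
  unfold pvA_count
  rw [PySem.Str.len_eq, PySem.List.pyRange_zero_natCast, List.foldl_map,
    PySem.List.foldl_add]
  simp only [pvA_char_nat]

theorem pvA_groupCount_zero (first p : String) (ms : List String) :
    pvA_groupCount first p ms = 0 ↔ ∀ m ∈ ms, pvOK first.toList.length p m := by
  unfold pvA_groupCount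
  simp only [pvA_count_eq]
  rw [PySem.List.foldl_add, zero_add]
  have hnn : ∀ x ∈ ms.map (fun m => ((List.range first.toList.length).map
      (fun i => p_matrix_commute (pvCh p i) (pvCh m i))).sum), 0 ≤ x := by
    intro x hx
    obtain ⟨m, _, rfl⟩ := List.mem_map.mp hx
    exact List.sum_nonneg (by
      intro y hy
      obtain ⟨i, _, rfl⟩ := List.mem_map.mp hy
      exact pv_commute_nonneg _ _)
  rw [pv_sum_zero _ hnn]
  constructor
  · intro h m hm i hi
    have hms := h _ (List.mem_map_of_mem hm)
    rw [pv_sum_zero] at hms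
    · exact hms _ (List.mem_map_of_mem (List.mem_range.mpr hi))
    · intro y hy
      obtain ⟨j, _, rfl⟩ := List.mem_map.mp hy
      exact pv_commute_nonneg _ _
  · intro h x hx
    obtain ⟨m, hm, rfl⟩ := List.mem_map.mp hx
    rw [pv_sum_zero]
    · intro y hy
      obtain ⟨j, hj, rfl⟩ := List.mem_map.mp hy
      exact h m hm j (List.mem_range.mp hj)
    · intro y hy
      obtain ⟨j, _, rfl⟩ := List.mem_map.mp hy
      exact pv_commute_nonneg _ _

theorem pv_commute_zero (a b : Char) :
    p_matrix_commute a b = 0 ↔ (a = 'I' ∨ b = 'I' ∨ a = b) := by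
  unfold p_matrix_commute
  split_ifs with h1 h2 h3 <;> simp_all

theorem pv_slice_take (l : List Char) (L : Nat) :
    PySem.List.slice l none (some (L : Int)) = l.take L := by
  rw [PySem.List.slice_to _ (by positivity)]
  simp

theorem pv_getD_take (l : List Char) (n i : Nat) (h : i < n) :
    (l.take n).getD i ' ' = l.getD i ' ' := by
  rw [List.getD_eq_getElem?_getD, List.getD_eq_getElem?_getD, List.getElem?_take]
  rw [if_pos h]

theorem pv_compat_iff (p : String) (prof : List Char) (L : Nat)
    (hp : L ≤ p.toList.length) (hprof : prof.length = L) :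
    (pvB_compat (p.toList.take L) prof = true) ↔
      ∀ i < L, (pvCh p i = 'I' ∨ prof.getD i ' ' = 'I' ∨ pvCh p i = prof.getD i ' ') := by
  unfold pvB_compat
  rw [List.all_eq_true]
  have hlen : ((p.toList.take L).zip prof).length = L := by
    rw [List.length_zip, List.length_take]; omega
  constructor
  · intro h i hi
    have hz : ((p.toList.take L).zip prof)[i]'(by omega) ∈ (p.toList.take L).zip prof :=
      List.getElem_mem _
    have hb := h _ hz
    rw [List.getElem_zip] at hb
    simp only [Bool.or_eq_true, beq_iff_eq] at hb
    have e1 : (p.toList.take L)[i]'(by rw [List.length_take]; omega) = pvCh p i := by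
      rw [List.getElem_take]
      unfold pvCh
      rw [List.getD_eq_getElem _ _ (by omega)]
    have e2 : prof[i]'(by omega) = prof.getD i ' ' := by
      rw [List.getD_eq_getElem _ _ (by omega)]
    rw [e1, e2] at hb
    tauto
  · intro h q hq
    obtain ⟨i, hi, rfl⟩ := List.mem_iff_getElem.mp hq
    rw [List.getElem_zip]
    have hi' : i < L := by omega
    have e1 : (p.toList.take L)[i]'(by rw [List.length_take]; omega) = pvCh p i := by
      rw [List.getElem_take]
      unfold pvCh
      rw [List.getD_eq_getElem _ _ (by omega)]
    have e2 : prof[i]'(by omega) = prof.getD i ' ' := by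
      rw [List.getD_eq_getElem _ _ (by omega)]
    simp only [Bool.or_eq_true, beq_iff_eq, e1, e2]
    have := h i hi'
    tauto

/- Part 4: the per-group profile invariant. -/

def pvProfOK (L : Nat) (g : List Char × List String) : Prop :=
  g.1.length = L ∧ (∀ m ∈ g.2, L ≤ m.toList.length) ∧
  (∀ i < L, g.1.getD i ' ' = 'I' → ∀ m ∈ g.2, pvCh m i = 'I') ∧
  (∀ i < L, ∀ m ∈ g.2, pvCh m i = 'I' ∨ pvCh m i = g.1.getD i ' ') ∧
  (∀ i < L, g.1.getD i ' ' ≠ 'I' → ∃ m ∈ g.2, pvCh m i = g.1.getD i ' ')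

theorem pv_prof_equiv (L : Nat) (g : List Char × List String) (p : String)
    (hg : pvProfOK L g) :
    (∀ i < L, (pvCh p i = 'I' ∨ g.1.getD i ' ' = 'I' ∨ pvCh p i = g.1.getD i ' ')) ↔
      (∀ m ∈ g.2, pvOK L p m) := by
  obtain ⟨hlen, hmlen, h3, h4, h5⟩ := hg
  constructor
  · intro h m hm i hi
    rw [pv_commute_zero]
    rcases h i hi with h1 | h2 | hpe
    · exact Or.inl h1
    · exact Or.inr (Or.inl (h3 i hi h2 m hm))
    · rcases h4 i hi m hm with hmI | hme
      · exact Or.inr (Or.inl hmI)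
      · exact Or.inr (Or.inr (by rw [hpe, hme]))
  · intro h i hi
    by_cases hpI : pvCh p i = 'I'
    · exact Or.inl hpI
    by_cases hfI : g.1.getD i ' ' = 'I'
    · exact Or.inr (Or.inl hfI)
    obtain ⟨m, hm, hme⟩ := h5 i hi hfI
    rcases (pv_commute_zero _ _).mp (h m hm i hi) with h1 | h2 | h3'
    · exact absurd h1 hpI
    · rw [h2] at hme; exact absurd hme.symm hfI
    · exact Or.inr (Or.inr (by rw [h3', hme]))

theorem pvB_merge_len (pl prof : List Char) :
    (pvB_merge pl prof).length = min pl.length prof.length := by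
  simp [pvB_merge]

theorem pvB_merge_getD (pl prof : List Char) (i : Nat)
    (h1 : i < pl.length) (h2 : i < prof.length) :
    (pvB_merge pl prof).getD i ' ' =
      if prof.getD i ' ' = 'I' then pl.getD i ' ' else prof.getD i ' ' := by
  have hl : i < (pvB_merge pl prof).length := by rw [pvB_merge_len]; omega
  rw [List.getD_eq_getElem _ _ hl, List.getD_eq_getElem _ _ h1, List.getD_eq_getElem _ _ h2]
  unfold pvB_merge
  simp [List.getElem_zip]

theorem pv_profOK_merge (L : Nat) (p : String) (g : List Char × List String)
    (hg : pvProfOK L g) (hp : L ≤ p.toList.length)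
    (hc : ∀ i < L, (pvCh p i = 'I' ∨ g.1.getD i ' ' = 'I' ∨ pvCh p i = g.1.getD i ' ')) :
    pvProfOK L (pvB_merge (p.toList.take L) g.1, g.2 ++ [p]) := by
  obtain ⟨hlen, hmlen, h3, h4, h5⟩ := hg
  have htl : (p.toList.take L).length = L := by rw [List.length_take]; omega
  have hget : ∀ i < L, (pvB_merge (p.toList.take L) g.1).getD i ' ' =
      if g.1.getD i ' ' = 'I' then pvCh p i else g.1.getD i ' ' := by
    intro i hi
    rw [pvB_merge_getD _ _ _ (by omega) (by omega), pv_getD_take _ _ _ hi]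
    rfl
  refine ⟨by rw [pvB_merge_len]; omega, ?_, ?_, ?_, ?_⟩
  · intro m hm
    rcases List.mem_append.mp hm with hm' | hm'
    · exact hmlen m hm'
    · simp at hm'; subst hm'; exact hp
  · intro i hi hI m hm
    rw [hget i hi] at hI
    rcases List.mem_append.mp hm with hm' | hm'
    · by_cases hfI : g.1.getD i ' ' = 'I'
      · exact h3 i hi hfI m hm'
      · rw [if_neg hfI] at hI; exact absurd hI hfI
    · simp at hm'; subst hm'
      by_cases hfI : g.1.getD i ' ' = 'I'
      · rwa [if_pos hfI] at hI
      · rw [if_neg hfI] at hI; exact absurd hI hfI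
  · intro i hi m hm
    rw [hget i hi]
    rcases List.mem_append.mp hm with hm' | hm'
    · by_cases hfI : g.1.getD i ' ' = 'I'
      · rw [if_pos hfI]
        exact Or.inl (h3 i hi hfI m hm')
      · rw [if_neg hfI]
        exact h4 i hi m hm'
    · simp at hm'; subst hm'
      by_cases hfI : g.1.getD i ' ' = 'I'
      · rw [if_pos hfI]; exact Or.inr rfl
      · rw [if_neg hfI]
        rcases hc i hi with h1 | h2 | he
        · exact Or.inl h1
        · exact absurd h2 hfI
        · exact Or.inr he
  · intro i hi hnI
    rw [hget i hi] at hnI ⊢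
    by_cases hfI : g.1.getD i ' ' = 'I'
    · rw [if_pos hfI] at hnI ⊢
      exact ⟨p, by simp, rfl⟩
    · rw [if_neg hfI] at hnI ⊢
      obtain ⟨m, hm, hme⟩ := h5 i hi hfI
      exact ⟨m, List.mem_append.mpr (Or.inl hm), hme⟩

theorem pv_profOK_single (L : Nat) (p : String) (hp : L ≤ p.toList.length) :
    pvProfOK L (p.toList.take L, [p]) := by
  have hget : ∀ i < L, (p.toList.take L).getD i ' ' = pvCh p i := by
    intro i hi
    rw [pv_getD_take _ _ _ hi]; rfl
  refine ⟨by rw [List.length_take]; omega, by simpa using hp, ?_, ?_, ?_⟩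
  · intro i hi hI m hm
    simp at hm; subst hm
    rwa [hget i hi] at hI
  · intro i hi m hm
    simp at hm; subst hm
    rw [hget i hi]
    exact Or.inr rfl
  · intro i hi _
    exact ⟨p, by simp, (hget i hi).symm⟩

/- Part 5: rendering the group list as the numbered dict, and dict-level lemmas. -/

def pvRenderFrom (s : Int) (gs : List (List Char × List String)) : List (String × List String) :=
  (PySem.List.enumerate gs s).map (fun ig => (PySem.Int.toStr (ig.1 + 1), ig.2.2))

theorem pvRender_eq (gs : List (List Char × List String)) : pvRender gs = pvRenderFrom 0 gs := rfl

theorem pvRenderFrom_nil (s : Int) : pvRenderFrom s [] = [] := by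
  simp [pvRenderFrom, PySem.List.enumerate_nil]

theorem pvRenderFrom_cons (s : Int) (g : List Char × List String)
    (gs : List (List Char × List String)) :
    pvRenderFrom s (g :: gs) = (PySem.Int.toStr (s + 1), g.2) :: pvRenderFrom (s + 1) gs := by
  simp [pvRenderFrom, PySem.List.enumerate_cons]

theorem pvRenderFrom_append (s : Int) (xs ys : List (List Char × List String)) :
    pvRenderFrom s (xs ++ ys) = pvRenderFrom s xs ++ pvRenderFrom (s + xs.length) ys := by
  simp [pvRenderFrom, PySem.List.enumerate_append]

theorem pv_find_none (gs : List (List Char × List String)) :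
    ∀ (s : Int), 0 ≤ s → ∀ (c : Int), s + gs.length < c →
    (pvRenderFrom s gs).find? (fun q => q.1 == PySem.Int.toStr c) = none := by
  induction gs with
  | nil => intro s _ c _; rw [pvRenderFrom_nil]; rfl
  | cons g gs ih =>
      intro s hs c hc
      rw [pvRenderFrom_cons]
      have hcast : ((g :: gs).length : Int) = (gs.length : Int) + 1 := by
        rw [List.length_cons]; push_cast; ring
      rw [hcast] at hc
      rw [List.find?_cons_of_neg
        (by
          have hb := pv_toStr_beq_false (a := s + 1) (b := c) (by omega) (by omega) (by omega)
          simp [hb])]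
      exact ih (s + 1) (by omega) c (by omega)

theorem pv_find_render (gs : List (List Char × List String)) :
    ∀ (s : Int), 0 ≤ s → ∀ (j : Nat) (hj : j < gs.length),
    (pvRenderFrom s gs).find? (fun q => q.1 == PySem.Int.toStr (s + j + 1)) =
      some (PySem.Int.toStr (s + j + 1), (gs[j]'hj).2) := by
  induction gs with
  | nil => intro s _ j hj; simp at hj
  | cons g gs ih =>
      intro s hs j hj
      rw [pvRenderFrom_cons]
      cases j with
      | zero =>
          rw [List.find?_cons_of_pos (by simp)]
          simp
      | succ j =>
          rw [List.find?_cons_of_neg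
            (by
              have hb := pv_toStr_beq_false (a := s + 1) (b := s + ((j : Int) + 1) + 1)
                (by omega) (by omega) (by omega)
              simp [hb])]
          have hrec := ih (s + 1) (by omega) j (Nat.lt_of_succ_lt_succ hj)
          have harg : s + 1 + (j : Int) + 1 = s + (((j : Nat) + 1 : Nat) : Int) + 1 := by
            push_cast; ring
          rw [harg] at hrec
          rw [hrec]
          simp

theorem pv_map_render_id (gs : List (List Char × List String)) :
    ∀ (s c : Int) (v : List String), 0 ≤ c → c < s + 1 → 0 ≤ s →
    (pvRenderFrom s gs).map
        (fun q => if q.1 == PySem.Int.toStr c then (PySem.Int.toStr c, v) else q) =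
      pvRenderFrom s gs := by
  induction gs with
  | nil => intro s c v _ _ _; rw [pvRenderFrom_nil]; rfl
  | cons g gs ih =>
      intro s c v hc hcs hs
      rw [pvRenderFrom_cons, List.map_cons]
      have hb := pv_toStr_beq_false (a := s + 1) (b := c) (by omega) hc (by omega)
      rw [ih (s + 1) c v hc (by omega) (by omega)]
      simp [hb]

theorem pv_map_render (gs : List (List Char × List String)) :
    ∀ (s : Int), 0 ≤ s → ∀ (j : Nat), j < gs.length → ∀ (g' : List Char × List String),
    (pvRenderFrom s gs).map
        (fun q => if q.1 == PySem.Int.toStr (s + j + 1)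
          then (PySem.Int.toStr (s + j + 1), g'.2) else q) =
      pvRenderFrom s (gs.set j g') := by
  induction gs with
  | nil => intro s _ j hj; simp at hj
  | cons g gs ih =>
      intro s hs j hj g'
      cases j with
      | zero =>
          rw [pvRenderFrom_cons, List.map_cons]
          have h0 : s + (((0 : Nat) : Int)) + 1 = s + 1 := by push_cast; ring
          rw [h0]
          rw [List.set_cons_zero, pvRenderFrom_cons]
          rw [pv_map_render_id gs (s + 1) (s + 1) g'.2 (by omega) (by omega) (by omega)]
          simp
      | succ j =>
          rw [pvRenderFrom_cons, List.map_cons]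
          have hb := pv_toStr_beq_false (a := s + 1) (b := s + ((j : Int) + 1) + 1)
            (by omega) (by omega) (by omega)
          rw [List.set_cons_succ, pvRenderFrom_cons]
          have hrec := ih (s + 1) (by omega) j (Nat.lt_of_succ_lt_succ hj) g'
          have harg : s + 1 + (j : Int) + 1 = s + (((j : Nat) + 1 : Nat) : Int) + 1 := by
            push_cast; ring
          rw [harg] at hrec
          rw [hrec]
          simp [hb]

theorem pv_set_append (pre suf : List (List Char × List String))
    (g g' : List Char × List String) :
    (pre ++ g :: suf).set pre.length g' = pre ++ g' :: suf := by
  induction pre with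
  | nil => rfl
  | cons x pre ih => simp [List.set_cons_succ, ih]

theorem pv_dict_getD (d : PySem.Dict String (List String)) (k : String) :
    d.getD k [] = ((d.items.find? (fun q => q.1 == k)).map (fun q => q.2)).getD [] := rfl

theorem pv_dict_get? (d : PySem.Dict String (List String)) (k : String) :
    d.get? k = (d.items.find? (fun q => q.1 == k)).map (fun q => q.2) := rfl

/- Part 6: A's color loop is B's first-fit placement over the profile list. -/

theorem pv_try_place (first p : String) (hp : first.toList.length ≤ p.toList.length) :
    ∀ (suf pre : List (List Char × List String)) (d : PySem.Dict String (List String)),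
    d.items = pvRenderFrom 0 (pre ++ suf) →
    (∀ g ∈ suf, pvProfOK first.toList.length g) →
    (∃ d', pvA_tryColors first p d
          (PySem.List.pyRange ((pre.length : Int) + 1) ((pre.length : Int) + (suf.length : Int) + 1) 1) =
          some d'
        ∧ d'.items = pvRenderFrom 0 (pre ++ pvB_place (first.toList.length : Int) p suf)
        ∧ (pvB_place (first.toList.length : Int) p suf).length = suf.length)
    ∨ (pvA_tryColors first p d
          (PySem.List.pyRange ((pre.length : Int) + 1) ((pre.length : Int) + (suf.length : Int) + 1) 1) =
          none
        ∧ pvB_place (first.toList.length : Int) p suf =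
            suf ++ [(p.toList.take first.toList.length, [p])]) := by
  intro suf
  induction suf with
  | nil =>
      intro pre d hitems hinv
      right
      constructor
      · rw [PySem.List.pyRange_one_eq_nil (by simp)]
        rfl
      · unfold pvB_place
        rw [pv_slice_take]
        rfl
  | cons g suf ih =>
      intro pre d hitems hinv
      have hg := hinv g List.mem_cons_self
      have hrange : PySem.List.pyRange ((pre.length : Int) + 1)
          ((pre.length : Int) + ((g :: suf).length : Int) + 1) 1 =
          ((pre.length : Int) + 1) ::
            PySem.List.pyRange ((pre.length : Int) + 1 + 1)
              ((pre.length : Int) + ((g :: suf).length : Int) + 1) 1 := by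
        rw [PySem.List.pyRange_one_cons (by rw [List.length_cons]; push_cast; omega)]
      have hfind : (d.items).find?
          (fun q => q.1 == PySem.Int.toStr ((pre.length : Int) + 1)) =
          some (PySem.Int.toStr ((pre.length : Int) + 1), g.2) := by
        rw [hitems]
        have hidx : (pre ++ g :: suf)[pre.length]'(by simp) = g := by
          rw [List.getElem_append_right le_rfl]
          simp
        have hfr := pv_find_render (pre ++ g :: suf) 0 le_rfl pre.length (by simp)
        rw [hidx] at hfr
        have harg : (0 : Int) + (pre.length : Int) + 1 = (pre.length : Int) + 1 := by ring
        rw [harg] at hfr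
        exact hfr
      have hgetD : d.getD (PySem.Int.toStr ((pre.length : Int) + 1)) [] = g.2 := by
        rw [pv_dict_getD, hfind]
        rfl
      have hcnt : pvA_groupCount first p
          (d.getD (PySem.Int.toStr ((pre.length : Int) + 1)) []) = 0 ↔
          pvB_compat (p.toList.take first.toList.length) g.1 = true := by
        rw [hgetD, pvA_groupCount_zero,
          pv_compat_iff p g.1 first.toList.length hp hg.1]
        exact (pv_prof_equiv first.toList.length g p hg).symm
      by_cases hcompat : pvB_compat (p.toList.take first.toList.length) g.1 = true
      · left
        have hz : pvA_groupCount first p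
            (d.getD (PySem.Int.toStr ((pre.length : Int) + 1)) []) = 0 := hcnt.mpr hcompat
        have hsome : d.get? (PySem.Int.toStr ((pre.length : Int) + 1)) = some g.2 := by
          rw [pv_dict_get?, hfind]
          rfl
        have hcont : d.contains (PySem.Int.toStr ((pre.length : Int) + 1)) = true := by
          cases hcc : d.contains (PySem.Int.toStr ((pre.length : Int) + 1))
          · have h0 := (PySem.Dict.get?_eq_none_iff_contains d _).mpr hcc
            rw [hsome] at h0
            exact absurd h0 (Option.some_ne_none _)
          · rfl
        refine ⟨d.modify (PySem.Int.toStr ((pre.length : Int) + 1)) []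
            (fun gg => gg ++ [p]), ?_, ?_, ?_⟩
        · rw [hrange]
          simp only [pvA_tryColors]
          rw [if_pos hz]
        · show (d.insert (PySem.Int.toStr ((pre.length : Int) + 1))
              ((d.getD (PySem.Int.toStr ((pre.length : Int) + 1)) []) ++ [p])).items = _
          rw [PySem.Dict.items_insert_of_contains _ _ hcont, hgetD, hitems]
          have hmap := pv_map_render (pre ++ g :: suf) 0 le_rfl pre.length (by simp)
            (pvB_merge (p.toList.take first.toList.length) g.1, g.2 ++ [p])
          have harg : (0 : Int) + (pre.length : Int) + 1 = (pre.length : Int) + 1 := by ring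
          rw [harg] at hmap
          rw [hmap, pv_set_append]
          show _ = pvRenderFrom 0 (pre ++ pvB_place ((first.toList.length : Nat) : Int) p (g :: suf))
          unfold pvB_place
          rw [pv_slice_take, if_pos hcompat]
        · unfold pvB_place
          rw [pv_slice_take, if_pos hcompat]
          simp
      · have hnz : ¬ pvA_groupCount first p
            (d.getD (PySem.Int.toStr ((pre.length : Int) + 1)) []) = 0 :=
          fun hz => hcompat (hcnt.mp hz)
        have hitems' : d.items = pvRenderFrom 0 ((pre ++ [g]) ++ suf) := by
          rw [hitems, List.append_assoc]
          rfl
        have hrec := ih (pre ++ [g]) d hitems' (fun g' hg' => hinv g' (List.mem_cons_of_mem _ hg'))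
        have hlen1 : (((pre ++ [g]).length : Nat) : Int) = (pre.length : Int) + 1 := by
          simp
        rw [hlen1] at hrec
        have hr2 : (pre.length : Int) + 1 + (suf.length : Int) + 1 =
            (pre.length : Int) + ((g :: suf).length : Int) + 1 := by
          rw [List.length_cons]; push_cast; ring
        rw [hr2] at hrec
        have hplace_cons : pvB_place ((first.toList.length : Nat) : Int) p (g :: suf) =
            g :: pvB_place ((first.toList.length : Nat) : Int) p suf := by
          conv_lhs => rw [pvB_place]
          rw [pv_slice_take, if_neg hcompat]
        rcases hrec with ⟨d', he, hi', hl⟩ | ⟨he, hpl⟩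
        · left
          refine ⟨d', ?_, ?_, ?_⟩
          · rw [hrange]
            simp only [pvA_tryColors]
            rw [if_neg hnz]
            exact he
          · rw [hi', hplace_cons, List.append_assoc]
            rfl
          · rw [hplace_cons]
            simp only [List.length_cons, hl]
        · right
          constructor
          · rw [hrange]
            simp only [pvA_tryColors]
            rw [if_neg hnz]
            exact he
          · rw [hplace_cons, hpl]
            rfl

/- Part 7: placement preserves the invariant; one step; the whole fold. -/

theorem pv_place_inv (first p : String) (hp : first.toList.length ≤ p.toList.length) :
    ∀ (gs : List (List Char × List String)),
    (∀ g ∈ gs, pvProfOK first.toList.length g) →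
    ∀ g' ∈ pvB_place ((first.toList.length : Nat) : Int) p gs, pvProfOK first.toList.length g' := by
  intro gs
  induction gs with
  | nil =>
      intro _ g' hg'
      unfold pvB_place at hg'
      rw [pv_slice_take] at hg'
      simp at hg'
      subst hg'
      exact pv_profOK_single _ _ hp
  | cons g gs ih =>
      intro h g' hg'
      unfold pvB_place at hg'
      rw [pv_slice_take] at hg'
      by_cases hc : pvB_compat (p.toList.take first.toList.length) g.1 = true
      · rw [if_pos hc] at hg'
        rcases List.mem_cons.mp hg' with rfl | hg''
        · have hgok := h g List.mem_cons_self
          exact pv_profOK_merge _ _ _ hgok hp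
            ((pv_compat_iff p g.1 first.toList.length hp hgok.1).mp hc)
        · exact h g' (List.mem_cons_of_mem _ hg'')
      · rw [if_neg hc] at hg'
        rcases List.mem_cons.mp hg' with rfl | hg''
        · exact h g' List.mem_cons_self
        · exact ih (fun q hq => h q (List.mem_cons_of_mem _ hq)) g' hg''

theorem pv_step (first p : String) (hp : first.toList.length ≤ p.toList.length)
    (gs : List (List Char × List String)) (st : PySem.Dict String (List String) × Int)
    (h1 : st.2 = (gs.length : Int)) (h2 : st.1.items = pvRenderFrom 0 gs)
    (h3 : ∀ g ∈ gs, pvProfOK first.toList.length g) :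
    (pvA_step first st p).2 = (((pvB_place ((first.toList.length : Nat) : Int) p gs).length : Nat) : Int) ∧
    (pvA_step first st p).1.items = pvRenderFrom 0 (pvB_place ((first.toList.length : Nat) : Int) p gs) ∧
    ∀ g ∈ pvB_place ((first.toList.length : Nat) : Int) p gs, pvProfOK first.toList.length g := by
  have hitems : st.1.items = pvRenderFrom 0 (([] : List (List Char × List String)) ++ gs) := by
    simpa using h2
  have htp := pv_try_place first p hp gs [] st.1 hitems h3
  have hrange : PySem.List.pyRange 1 (st.2 + 1) 1 =
      PySem.List.pyRange (((([] : List (List Char × List String)).length : Nat) : Int) + 1)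
        (((([] : List (List Char × List String)).length : Nat) : Int) + (gs.length : Int) + 1) 1 := by
    rw [h1]; norm_num
  rcases htp with ⟨d', he, hi', hl⟩ | ⟨he, hpl⟩
  · have hstep : pvA_step first st p = (d', st.2) := by
      unfold pvA_step
      rw [hrange, he]
    rw [hstep]
    refine ⟨by rw [h1, hl], by simpa using hi', pv_place_inv first p hp gs h3⟩
  · have hstep : pvA_step first st p =
        (st.1.insert (PySem.Int.toStr (st.2 + 1)) [p], st.2 + 1) := by
      unfold pvA_step
      rw [hrange, he]
    have hnone : st.1.get? (PySem.Int.toStr (st.2 + 1)) = none := by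
      rw [pv_dict_get?, h2, pv_find_none gs 0 le_rfl (st.2 + 1) (by omega)]
      rfl
    have hcont : st.1.contains (PySem.Int.toStr (st.2 + 1)) = false :=
      (PySem.Dict.get?_eq_none_iff_contains _ _).mp hnone
    rw [hstep]
    refine ⟨?_, ?_, pv_place_inv first p hp gs h3⟩
    · rw [hpl]
      simp only [List.length_append, List.length_cons, List.length_nil]
      push_cast
      omega
    · show (st.1.insert (PySem.Int.toStr (st.2 + 1)) [p]).items = _
      rw [PySem.Dict.items_insert_of_not_contains _ _ hcont, h2, hpl,
        pvRenderFrom_append, pvRenderFrom_cons, pvRenderFrom_nil]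
      have harg : 0 + ((gs.length : Nat) : Int) + 1 = st.2 + 1 := by omega
      rw [harg]

theorem pv_fold (first : String) :
    ∀ (tail : List String) (gs : List (List Char × List String))
      (st : PySem.Dict String (List String) × Int),
    (∀ p ∈ tail, first.toList.length ≤ p.toList.length) →
    st.2 = (gs.length : Int) → st.1.items = pvRenderFrom 0 gs →
    (∀ g ∈ gs, pvProfOK first.toList.length g) →
    (tail.foldl (pvA_step first) st).1.items =
      pvRenderFrom 0
        (tail.foldl (fun gs p => pvB_place ((first.toList.length : Nat) : Int) p gs) gs) := by
  intro tail
  induction tail with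
  | nil => intro gs st _ _ h2 _; simpa using h2
  | cons p tail ih =>
      intro gs st hall h1 h2 h3
      obtain ⟨e1, e2, e3⟩ := pv_step first p (hall p List.mem_cons_self) gs st h1 h2 h3
      simp only [List.foldl_cons]
      exact ih _ _ (fun q hq => hall q (List.mem_cons_of_mem _ hq)) e1 e2 e3

-- ===== VERDICT (by name: the statement is the Claim_ definition above) =====
theorem tpb_group_spec : Claim_equal_tpb_group := by
  unfold Claim_equal_tpb_group
  intro paulis _ hpre
  unfold Spec_tpb_group
  obtain ⟨hlen, hall⟩ := hpre
  match paulis, hlen with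
  | p0 :: first :: tail, _ =>
    have hall' : ∀ s ∈ first :: tail, first.toList.length ≤ s.toList.length := by
      simpa using hall
    have htail : ∀ p ∈ tail, first.toList.length ≤ p.toList.length :=
      fun p hp => hall' p (List.mem_cons_of_mem _ hp)
    have hslice : PySem.List.slice (p0 :: first :: tail) (some 1) none = first :: tail := by
      rw [PySem.List.slice_from _ (by norm_num)]
      rfl
    have hslice2 : PySem.List.slice (first :: tail) (some 1) none = tail := by
      rw [PySem.List.slice_from _ (by norm_num)]
      rfl
    have hfirst : PySem.List.pyGetD (first :: tail) 0 "" = first :=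
      PySem.List.pyGetD_zero_cons _ _ _
    simp only [tpb_group, tpb_group_alt, hslice, hfirst, hslice2, PySem.Str.len_eq,
      pvRender_eq, List.foldl_cons]
    have hinit : pvB_place ((first.toList.length : Nat) : Int) first [] =
        [(first.toList.take first.toList.length, [first])] := by
      unfold pvB_place
      rw [pv_slice_take]
    rw [hinit]
    apply pv_fold first tail [(first.toList.take first.toList.length, [first])]
      (⟨[("1", [first])]⟩, 1) htail
    · norm_num
    · show [("1", [first])] = _
      rw [pvRenderFrom_cons, pvRenderFrom_nil]
      have h1s : PySem.Int.toStr (0 + 1) = "1" := by decide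
      rw [h1s]
    · intro g hg
      simp at hg
      subst hg
      exact pv_profOK_single _ _ le_rfl
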